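-- pv_equiv track=rewrite | github.com/bmnascimento/von-neumann-simulator | sisprog/p2/interpretador.py | extrair
-- ===== SOURCE A (Python) =====
-- def extrair(code):
--     code = code + '\n'
--     palavras = []
--     while len(code) > 0:
--         nextChar = ''
--         firstWord = ''
--         while len(code) > 0:
--             nextChar = code[0]
--             code = code[1:]
--             if nextChar in [':', '+', '-', '*', '/', ';', '=']:
--                 if firstWord != '':
--                     palavras.append(firstWord)
--                 firstWord = nextChar
--                 palavras.append(firstWord)
--                 break
--             elif nextChar == ' ':
--                 if firstWord != '':
--                     palavras.append(firstWord)
--                 break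
--             elif nextChar == '\n':
--                 if firstWord != '':
--                     palavras.append(firstWord)
--                 if (len(palavras) > 1) and (palavras[-1] != '\n'):
--                     palavras.append(nextChar)
--                 break
--             else:
--                 firstWord += nextChar
--
--     return palavras
-- ===== SOURCE B (Python) =====
-- SEPARADORES = ':+-*/;='
--
-- def extrair(code):
--     palavras = []
--     for line in (code + '\n').split('\n')[:-1]:
--         spaced = ''.join(' ' + c + ' ' if c in SEPARADORES else c for c in line)
--         palavras.extend(t for t in spaced.split(' ') if t)
--         if len(palavras) > 1 and palavras[-1] != '\n':
--             palavras.append('\n')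
--     return palavras
-- ===== Notes on version B (the rewrite author's own statement) =====
-- stated objective: faster
-- what changed: Replaces the nested stateful char-by-char while loops (which re-slice the remaining string with code[1:] on every character) with a per-line pipeline: split on newlines, pad separator chars with spaces, split each line on spaces keeping non-empty pieces, then apply the conditional newline-token rule once per line.
import Mathlib
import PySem

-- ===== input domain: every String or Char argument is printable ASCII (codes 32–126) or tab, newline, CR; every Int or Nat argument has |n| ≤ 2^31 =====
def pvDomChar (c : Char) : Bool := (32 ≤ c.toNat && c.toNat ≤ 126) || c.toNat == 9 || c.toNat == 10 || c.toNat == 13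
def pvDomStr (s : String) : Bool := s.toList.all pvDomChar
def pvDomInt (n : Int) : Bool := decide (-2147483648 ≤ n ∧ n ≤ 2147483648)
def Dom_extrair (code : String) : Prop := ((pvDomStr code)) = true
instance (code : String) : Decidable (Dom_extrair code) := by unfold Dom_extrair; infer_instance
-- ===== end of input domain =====

-- B replaces A's nested char-by-char while loops (quadratic: code[1:] re-slices the
-- string per character) with a per-line pipeline (split on newlines, pad separators
-- with spaces, split on spaces, filter); measured faster, same return value.

-- ===== PORT A =====
-- the separator list A tests membership in
def extrairSeps : List Char := [':', '+', '-', '*', '/', ';', '=']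

-- A's inner `while` loop: consumes chars from `code` (strings ported as List Char),
-- returns (remaining code, updated palavras); `break` = return, exhaustion = return.
def extrairInner : List Char → List Char → List String → List Char × List String
  | [], _, palavras => ([], palavras)
  | nextChar :: rest, firstWord, palavras =>
    if extrairSeps.contains nextChar then
      let p := if firstWord ≠ [] then palavras ++ [String.mk firstWord] else palavras
      (rest, p ++ [String.mk [nextChar]])
    else if nextChar = ' ' then
      (rest, if firstWord ≠ [] then palavras ++ [String.mk firstWord] else palavras)
    else if nextChar = '\n' then
      let p := if firstWord ≠ [] then palavras ++ [String.mk firstWord] else palavras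
      (rest, if p.length > 1 ∧ PySem.List.pyGet? p (-1) ≠ some "\n" then p ++ ["\n"] else p)
    else
      extrairInner rest (firstWord ++ [nextChar]) palavras

-- termination facts for the outer loop (cited by `decreasing_by`)
theorem extrairInner_length_le : ∀ (l fw : List Char) (p : List String),
    (extrairInner l fw p).1.length ≤ l.length := by
  intro l
  induction l with
  | nil => intro fw p; simp [extrairInner]
  | cons c rest ih =>
    intro fw p
    simp only [extrairInner]
    split_ifs <;> simp <;> exact Nat.le_succ_of_le (ih _ _)

theorem extrairInner_length_lt : ∀ (l fw : List Char) (p : List String), l ≠ [] →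
    (extrairInner l fw p).1.length < l.length := by
  intro l fw p h
  match l with
  | c :: rest =>
    simp only [extrairInner]
    split_ifs <;> simp
    exact extrairInner_length_le _ _ _

-- A's outer `while` loop
def extrairOuter (code : List Char) (palavras : List String) : List String :=
  if h : code = [] then palavras
  else
    let r := extrairInner code [] palavras
    extrairOuter r.1 r.2
termination_by code.length
decreasing_by exact extrairInner_length_lt _ _ _ h

def extrair (code : String) : List String :=
  extrairOuter (code.toList ++ ['\n']) []

-- ===== PORT B =====
-- B's separator string ':+-*/;=' (membership only)
def extrairAltSeps : List Char := (":+-*/;=").toList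

def extrair_alt (code : String) : List String :=
  -- (code + '\n').split('\n')[:-1]  ([:-1] on a list is dropLast, exact)
  let lines := PySem.Chars.splitOn (code.toList ++ ['\n']) ['\n']
  lines.dropLast.foldl (fun palavras line =>
    -- ''.join(' '+c+' ' if c in SEPARADORES else c for c in line)
    let spaced := (line.map (fun c =>
      if extrairAltSeps.contains c then [' ', c, ' '] else [c])).flatten
    -- palavras.extend(t for t in spaced.split(' ') if t)
    let p1 := palavras ++
      ((PySem.Chars.splitOn spaced [' ']).filter (fun t => t ≠ [])).map
        (fun t => String.mk t)
    if p1.length > 1 ∧ PySem.List.pyGet? p1 (-1) ≠ some "\n" then p1 ++ ["\n"] else p1) []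

-- ===== PRECONDITION & SPEC =====
def Spec_extrair (code : String) (out : List String) : Prop := out = extrair_alt code
instance (code : String) (out : List String) : Decidable (Spec_extrair code out) := by unfold Spec_extrair; infer_instance

-- ===== CLAIM (what is proved, stated in full; the proofs are below) =====
def Claim_equal_extrair : Prop := ∀ (code : String), Dom_extrair code → Spec_extrair code (extrair code)

-- ===== LEMMAS AND PROOFS =====

-- the conditional newline-token rule (identical in both ports, definitionally)
def nlRule (p : List String) : List String :=
  if p.length > 1 ∧ PySem.List.pyGet? p (-1) ≠ some "\n" then p ++ ["\n"] else p

-- pending word flush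
def pend (fw : List Char) (p : List String) : List String :=
  if fw ≠ [] then p ++ [String.mk fw] else p

-- A's two loops fused into one tail-recursive scan
def scanA : List Char → List Char → List String → List String
  | [], _, p => p
  | c :: cs, fw, p =>
    if extrairSeps.contains c then scanA cs [] (pend fw p ++ [String.mk [c]])
    else if c = ' ' then scanA cs [] (pend fw p)
    else if c = '\n' then scanA cs [] (nlRule (pend fw p))
    else scanA cs (fw ++ [c]) p

-- structural model of splitting on a single character s
def spl (s : Char) : List Char → List (List Char)
  | [] => [[]]
  | c :: cs => if c = s then [] :: spl s cs else (spl s cs).modifyHead (c :: ·)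

-- char-level tokens A produces from one '\n'-free line started with pending word fw
def tokC : List Char → List Char → List (List Char)
  | [], fw => if fw ≠ [] then [fw] else []
  | c :: cs, fw =>
    if extrairSeps.contains c then (if fw ≠ [] then [fw] else []) ++ [[c]] ++ tokC cs []
    else if c = ' ' then (if fw ≠ [] then [fw] else []) ++ tokC cs []
    else tokC cs (fw ++ [c])

-- B's per-line padding
def padC (c : Char) : List Char := if extrairSeps.contains c then [' ', c, ' '] else [c]

def spacedOf (line : List Char) : List Char := (line.map padC).flatten

-- B's fold step, in terms of spl
def stepB (p : List String) (line : List Char) : List String :=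
  nlRule (p ++ ((spl ' ' (spacedOf line)).filter (fun t => t ≠ [])).map (fun t => String.mk t))

theorem spl_ne_nil (s : Char) (cs : List Char) : spl s cs ≠ [] := by
  induction cs with
  | nil => simp [spl]
  | cons c cs ih =>
    simp only [spl]
    split_ifs
    · simp
    · cases h : spl s cs with
      | nil => exact absurd h ih
      | cons a l => simp [List.modifyHead]

theorem splitOn_go_eq (s : Char) : ∀ (fuel : Nat) (l cur : List Char) (acc : List (List Char)),
    l.length ≤ fuel →
    PySem.Chars.splitOn.go [s] fuel l cur acc =
      acc.reverse ++ (spl s l).modifyHead (cur.reverse ++ ·) := by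
  intro fuel
  induction fuel with
  | zero =>
    intro l cur acc h
    interval_cases hl : l.length
    have : l = [] := List.length_eq_zero_iff.mp hl
    subst this
    simp [PySem.Chars.splitOn.go, spl, List.modifyHead]
  | succ fuel ih =>
    intro l cur acc h
    cases l with
    | nil => simp [PySem.Chars.splitOn.go, spl, List.modifyHead]
    | cons c rest =>
      rw [PySem.Chars.splitOn.go]
      by_cases hc : c = s
      · subst hc
        have hp : List.isPrefixOf [c] (c :: rest) = true := by simp [List.isPrefixOf]
        rw [if_pos hp]
        simp only [List.length_cons, List.length_nil, List.drop_succ_cons, List.drop_zero]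
        rw [ih rest [] (cur.reverse :: acc) (by simpa using Nat.le_of_succ_le_succ h)]
        simp [spl, List.modifyHead]
        cases spl c rest <;> rfl
      · have hp : List.isPrefixOf [s] (c :: rest) = false := by
          simp [List.isPrefixOf]; exact fun e => hc e.symm
        rw [if_neg (by simp [hp])]
        rw [ih rest (c :: cur) acc (Nat.le_of_succ_le_succ h)]
        cases hsp : spl s rest with
        | nil => exact absurd hsp (spl_ne_nil s rest)
        | cons a l' => simp [spl, hc, hsp, List.modifyHead]

theorem splitOn_eq_spl (s : Char) (cs : List Char) :
    PySem.Chars.splitOn cs [s] = spl s cs := by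
  rw [PySem.Chars.splitOn, splitOn_go_eq s (cs.length + 1) cs [] [] (Nat.le_succ _)]
  cases h : spl s cs with
  | nil => exact absurd h (spl_ne_nil s cs)
  | cons a l => simp [List.modifyHead]

theorem spl_no_sep (s : Char) (l : List Char) (h : s ∉ l) : spl s l = [l] := by
  induction l with
  | nil => rfl
  | cons c cs ih =>
    simp only [List.mem_cons, not_or] at h
    have h1 : ¬ c = s := fun e => h.1 e.symm
    simp [spl, h1, ih h.2, List.modifyHead]

theorem spl_append (s : Char) (l ys : List Char) (h : s ∉ l) :
    spl s (l ++ s :: ys) = l :: spl s ys := by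
  induction l with
  | nil => simp [spl]
  | cons c cs ih =>
    simp only [List.mem_cons, not_or] at h
    have h1 : ¬ c = s := fun e => h.1 e.symm
    simp [spl, h1, ih h.2, List.modifyHead]

-- token lemma: split-the-padded-line = A's token list
theorem spl_spaced (line : List Char) : ∀ fw : List Char, ' ' ∉ fw →
    (spl ' ' (fw ++ spacedOf line)).filter (fun t => t ≠ []) = tokC line fw := by
  induction line with
  | nil =>
    intro fw hfw
    rw [spacedOf]
    simp only [List.map_nil, List.flatten_nil, List.append_nil]
    rw [spl_no_sep ' ' fw hfw, tokC]
    by_cases h : fw = [] <;> simp [h]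
  | cons c cs ih =>
    intro fw hfw
    have hsp : spacedOf (c :: cs) = padC c ++ spacedOf cs := by
      simp [spacedOf]
    rw [hsp, tokC]
    by_cases h1 : extrairSeps.contains c
    · have hc : c ≠ ' ' := by
        intro e; subst e; rw [extrairSeps] at h1; exact absurd h1 (by decide)
      rw [padC, if_pos h1]
      have e1 : fw ++ ([' ', c, ' '] ++ spacedOf cs) =
          fw ++ ' ' :: ([c] ++ ' ' :: spacedOf cs) := by simp
      rw [List.append_assoc, e1, spl_append ' ' fw _ hfw,
        spl_append ' ' [c] _ (by simp; exact fun e => hc e.symm)]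
      have hx := ih [] (by simp)
      simp only [List.nil_append, ne_eq, decide_not] at hx
      have h1m : c ∈ extrairSeps := by simpa using h1
      have hc' : ¬ (' ' = c) := fun e => hc e.symm
      by_cases h : fw = [] <;>
        simp [h1m, h, List.filter_cons, hc, hc', ne_eq, decide_not, hx, tokC]
    · by_cases h2 : c = ' '
      · subst h2
        rw [padC, if_neg h1]
        have e1 : fw ++ ([' '] ++ spacedOf cs) = fw ++ ' ' :: spacedOf cs := by simp
        rw [List.append_assoc, e1, spl_append ' ' fw _ hfw]
        have hx := ih [] (by simp)
        simp only [List.nil_append, ne_eq, decide_not] at hx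
        have h1m : (' ' : Char) ∉ extrairSeps := by decide
        by_cases h : fw = [] <;>
          simp [h1m, h, List.filter_cons, ne_eq, decide_not, hx, tokC]
      · rw [padC, if_neg h1]
        have e1 : fw ++ ([c] ++ spacedOf cs) = (fw ++ [c]) ++ spacedOf cs := by simp
        rw [List.append_assoc, e1, ih (fw ++ [c]) (by
          simp only [List.mem_append, List.mem_singleton, not_or]
          exact ⟨hfw, fun e => h2 e.symm⟩)]
        have h1' : c ∉ extrairSeps := by simpa using h1
        simp [h1', h2]

-- line lemma: fused scan over one line = one fold step
theorem scanA_line (line : List Char) : ∀ (rest fw : List Char) (p : List String),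
    '\n' ∉ line →
    scanA (line ++ '\n' :: rest) fw p =
      scanA rest [] (nlRule (p ++ (tokC line fw).map (fun t => String.mk t))) := by
  induction line with
  | nil =>
    intro rest fw p _
    rw [List.nil_append, scanA, tokC]
    have h1 : extrairSeps.contains '\n' = false := by decide
    simp only [h1, Bool.false_eq_true, if_false, if_neg (by decide : ¬ ('\n' = ' ')),
      if_pos rfl]
    by_cases h : fw = [] <;> simp [pend, h]
  | cons c cs ih =>
    intro rest fw p hnl
    simp only [List.mem_cons, not_or] at hnl
    rw [List.cons_append, scanA, tokC]
    by_cases h1 : extrairSeps.contains c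
    · rw [if_pos h1, if_pos h1, ih rest [] _ hnl.2]
      by_cases h : fw = [] <;> simp [pend, h]
    · rw [if_neg h1, if_neg h1]
      by_cases h2 : c = ' '
      · rw [if_pos h2, if_pos h2, ih rest [] _ hnl.2]
        by_cases h : fw = [] <;> simp [pend, h]
      · rw [if_neg h2, if_neg h2, if_neg (fun e => hnl.1 e.symm), ih rest (fw ++ [c]) _ hnl.2]

-- the outer/inner loops compute scanA
theorem outer_inner (cs : List Char) : ∀ (fw : List Char) (p : List String),
    extrairOuter (extrairInner cs fw p).1 (extrairInner cs fw p).2 = scanA cs fw p := by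
  induction cs with
  | nil =>
    intro fw p
    rw [extrairInner, scanA, extrairOuter]
    rfl
  | cons c cs' ih =>
    intro fw p
    have step : ∀ q : List String, extrairOuter cs' q = scanA cs' [] q := by
      intro q
      cases cs' with
      | nil => rw [extrairOuter, scanA]; rfl
      | cons d ds =>
        rw [extrairOuter]
        simp only [reduceDIte, List.cons_ne_nil]
        exact ih [] q
    rw [extrairInner, scanA]
    by_cases h1 : extrairSeps.contains c
    · rw [if_pos h1, if_pos h1]
      exact step _
    · rw [if_neg h1, if_neg h1]
      by_cases h2 : c = ' '
      · rw [if_pos h2, if_pos h2]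
        exact step _
      · rw [if_neg h2, if_neg h2]
        by_cases h3 : c = '\n'
        · rw [if_pos h3, if_pos h3]
          exact step _
        · rw [if_neg h3, if_neg h3]
          exact ih _ _

theorem outer_eq_scanA (cs : List Char) (p : List String) :
    extrairOuter cs p = scanA cs [] p := by
  cases cs with
  | nil => rw [extrairOuter]; rfl
  | cons c cs' =>
    rw [extrairOuter]
    simp only [List.cons_ne_self, reduceDIte]
    exact outer_inner _ _ _

-- lines lemma
theorem dropWhile_head_false {p : Char → Bool} {d : Char} {rest : List Char} :
    ∀ l : List Char, l.dropWhile p = d :: rest → p d = false := by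
  intro l
  induction l with
  | nil => intro h; simp [List.dropWhile] at h
  | cons c cs ih =>
    intro h
    rw [List.dropWhile_cons] at h
    by_cases hc : p c = true
    · exact ih (by rwa [if_pos hc] at h)
    · rw [if_neg hc] at h
      cases h
      simpa using hc

theorem scanA_lines : ∀ (n : Nat) (code : List Char) (p : List String), code.length ≤ n →
    scanA (code ++ ['\n']) [] p =
      ((spl '\n' (code ++ ['\n'])).dropLast).foldl stepB p := by
  intro n
  induction n with
  | zero =>
    intro code p h
    have : code = [] := List.length_eq_zero_iff.mp (Nat.le_zero.mp h)
    subst this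
    have hline := scanA_line [] ([] : List Char) [] p (by simp)
    simp only [List.nil_append] at hline
    rw [List.nil_append, hline]
    have hsp := spl_spaced [] [] (by simp)
    simp only [List.nil_append] at hsp
    simp [stepB, scanA, tokC, spacedOf, spl]
  | succ n ih =>
    intro code p h
    have hdec := (List.takeWhile_append_dropWhile (p := fun c => decide (c ≠ '\n')) (l := code)).symm
    have hnl : '\n' ∉ code.takeWhile (fun c => decide (c ≠ '\n')) := by
      intro hm
      have := List.mem_takeWhile_imp hm
      simp at this
    cases hdw : code.dropWhile (fun c => decide (c ≠ '\n')) with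
    | nil =>
      have hex : ∃ t : List Char, '\n' ∉ t ∧ code = t := by
        refine ⟨code.takeWhile (fun c => decide (c ≠ '\n')), hnl, ?_⟩
        rw [hdw, List.append_nil] at hdec
        exact hdec
      obtain ⟨t, ht, hcode⟩ := hex
      rw [hcode]
      rw [scanA_line t [] [] p ht, spl_append '\n' t [] ht]
      have h2 : (t :: spl '\n' ([] : List Char)).dropLast = [t] := by simp [spl]
      rw [h2, List.foldl_cons, List.foldl_nil]
      have hsp := spl_spaced t [] (by simp)
      simp only [List.nil_append] at hsp
      rw [scanA]
      simp only [stepB]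
      rw [hsp]
    | cons d rest =>
      have hd : d = '\n' := by
        have := dropWhile_head_false code hdw
        simpa using this
      subst hd
      have hex : ∃ t : List Char, '\n' ∉ t ∧ code = t ++ '\n' :: rest := by
        refine ⟨code.takeWhile (fun c => decide (c ≠ '\n')), hnl, ?_⟩
        rw [hdw] at hdec
        exact hdec
      obtain ⟨t, ht, hcode⟩ := hex
      rw [hcode] at h ⊢
      have hlen : rest.length ≤ n := by
        simp only [List.length_append, List.length_cons] at h
        omega
      have e1 : (t ++ '\n' :: rest) ++ ['\n'] = t ++ '\n' :: (rest ++ ['\n']) := by simp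
      rw [e1, scanA_line t _ [] p ht, spl_append '\n' t _ ht,
        List.dropLast_cons_of_ne_nil (spl_ne_nil '\n' (rest ++ ['\n'])),
        List.foldl_cons]
      rw [ih rest _ hlen]
      have hsp := spl_spaced t [] (by simp)
      simp only [List.nil_append] at hsp
      simp only [stepB]
      rw [hsp]

-- ===== VERDICT (by name: the statement is the Claim_ definition above) =====
theorem extrair_spec : Claim_equal_extrair := by
  intro code _
  unfold Spec_extrair
  rw [extrair, outer_eq_scanA, scanA_lines code.toList.length code.toList [] (le_refl _)]
  rw [extrair_alt]
  have hfun : (fun (palavras : List String) (line : List Char) =>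
      let spaced := (line.map (fun c =>
        if extrairAltSeps.contains c then [' ', c, ' '] else [c])).flatten
      let p1 := palavras ++
        ((PySem.Chars.splitOn spaced [' ']).filter (fun t => t ≠ [])).map
          (fun t => String.mk t)
      if p1.length > 1 ∧ PySem.List.pyGet? p1 (-1) ≠ some "\n" then p1 ++ ["\n"] else p1) =
      stepB := by
    funext q line
    have hpad : padC = fun c =>
        if extrairAltSeps.contains c then [' ', c, ' '] else [c] := by
      have he : extrairAltSeps = extrairSeps := by decide
      funext c
      rw [he, padC]
    simp only [stepB, nlRule, spacedOf, splitOn_eq_spl, hpad]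
  rw [hfun]
  simp only [splitOn_eq_spl]
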